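-- pv_equiv track=rewrite | github.com/pragnyadash/dna-rna-sequencing | dna-rna-sequencing.py | confirmSeq
-- ===== SOURCE A (Python) =====
-- modifiers= ["-", "m", "b", "d"]
--
-- bases = ['A', 'G', 'C', 'T', 'U', 'R', 'Y', 'S', 'W', 'K', 'M', 'B', 'D', 'H', 'V', 'N']
--
-- sugars = ['d', 'r', 'e', 'm', 'y', 'l', 'k', 'o']
--
-- linkages = ['o', 's']
--
-- def confirmSeq(seq):
--   i=0
--   flag = "Success"
--   if len(seq)%4 != 3:
--     return "Failure"
--   while(i<len(seq)):
--     #Check modifier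
--     if seq[i] in modifiers:
--       pass
--     else:
--       flag = "Failure"
--       break
--     #Check base
--     try:
--       seq[i+1]
--     except:
--       break
--     if seq[i+1] in bases:
--       pass
--     else:
--       flag = "Failure"
--       break
--     #Check sugars
--     try:
--       seq[i+2]
--     except:
--       break
--     if seq[i+2] in sugars:
--       pass
--     else:
--       flag = "Failure"
--       break
--     #Check linkages
--     try:
--       seq[i+3]
--     except:
--       break
--     if seq[i+3] in linkages:
--       pass
--     else:
--       flag = "Failure"
--       break
--     i += 4
--   return flag
-- ===== SOURCE B (Python) =====
-- modifiers= ["-", "m", "b", "d"]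
--
-- bases = ['A', 'G', 'C', 'T', 'U', 'R', 'Y', 'S', 'W', 'K', 'M', 'B', 'D', 'H', 'V', 'N']
--
-- sugars = ['d', 'r', 'e', 'm', 'y', 'l', 'k', 'o']
--
-- linkages = ['o', 's']
--
-- groups = [modifiers, bases, sugars, linkages]
--
-- def confirmSeq(seq):
--   if len(seq) % 4 != 3:
--     return "Failure"
--   for idx, ch in enumerate(seq):
--     if ch not in groups[idx % 4]:
--       return "Failure"
--   return "Success"
-- ===== Notes on version B (the rewrite author's own statement) =====
-- stated objective: simpler
-- what changed: Replaces the step-by-4 while loop with four sequential try/except-guarded checks by a single flat enumerate pass dispatching each character through a position->alphabet table (groups[idx % 4]); the length guard makes the omitted final linkage check fall out of the modulo dispatch automatically.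
import Mathlib
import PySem

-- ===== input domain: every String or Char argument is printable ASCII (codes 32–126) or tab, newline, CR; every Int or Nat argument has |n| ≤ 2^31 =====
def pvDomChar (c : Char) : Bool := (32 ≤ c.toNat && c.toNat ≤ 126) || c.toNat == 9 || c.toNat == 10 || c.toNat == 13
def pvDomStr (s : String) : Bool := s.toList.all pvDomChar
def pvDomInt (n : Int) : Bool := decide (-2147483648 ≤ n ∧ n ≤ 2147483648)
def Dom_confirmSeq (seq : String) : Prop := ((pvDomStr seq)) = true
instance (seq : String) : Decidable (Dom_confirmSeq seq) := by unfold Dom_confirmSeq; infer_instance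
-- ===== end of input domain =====

-- B replaces A's step-by-4 while loop with try/except index probes by a flat one-pass
-- table dispatch (groups[idx % 4]); same O(n) cost, simpler decomposition.

-- ===== PORT A =====
def pvAModifiers : List Char := ['-', 'm', 'b', 'd']
def pvABases : List Char := ['A', 'G', 'C', 'T', 'U', 'R', 'Y', 'S', 'W', 'K', 'M', 'B', 'D', 'H', 'V', 'N']
def pvASugars : List Char := ['d', 'r', 'e', 'm', 'y', 'l', 'k', 'o']
def pvALinkages : List Char := ['o', 's']

-- the while loop of A: index i steps by 4; seq[i+k] that raises IndexError = break with current flag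
def pvALoop (cs : List Char) (i : Nat) : String :=
  if h : i < cs.length then
    if cs[i] ∈ pvAModifiers then
      match cs[i+1]? with
      | none => "Success"            -- try seq[i+1] raised: break, flag still "Success"
      | some c1 =>
        if c1 ∈ pvABases then
          match cs[i+2]? with
          | none => "Success"
          | some c2 =>
            if c2 ∈ pvASugars then
              match cs[i+3]? with
              | none => "Success"
              | some c3 =>
                if c3 ∈ pvALinkages then pvALoop cs (i+4) else "Failure"
            else "Failure"
        else "Failure"
    else "Failure"
  else "Success"
termination_by cs.length - i

def confirmSeq (seq : String) : String :=
  if seq.toList.length % 4 ≠ 3 then "Failure" else pvALoop seq.toList 0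

-- ===== PORT B =====
def pvBGroups : List (List Char) :=
  [['-', 'm', 'b', 'd'],
   ['A', 'G', 'C', 'T', 'U', 'R', 'Y', 'S', 'W', 'K', 'M', 'B', 'D', 'H', 'V', 'N'],
   ['d', 'r', 'e', 'm', 'y', 'l', 'k', 'o'],
   ['o', 's']]

-- the flat enumerate loop of B: one character at a time, alphabet chosen by idx % 4
def pvBLoop (cs : List Char) (idx : Nat) : String :=
  match cs with
  | [] => "Success"
  | c :: rest => if c ∈ pvBGroups[idx % 4]! then pvBLoop rest (idx + 1) else "Failure"

def confirmSeq_alt (seq : String) : String :=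
  if seq.toList.length % 4 ≠ 3 then "Failure" else pvBLoop seq.toList 0

-- ===== PRECONDITION & SPEC =====
def Spec_confirmSeq (seq : String) (out : String) : Prop := out = confirmSeq_alt seq
instance (seq : String) (out : String) : Decidable (Spec_confirmSeq seq out) := by unfold Spec_confirmSeq; infer_instance

-- ===== CLAIM (what is proved, stated in full; the proofs are below) =====
def Claim_equal_confirmSeq : Prop := ∀ (seq : String), Dom_confirmSeq seq → Spec_confirmSeq seq (confirmSeq seq)

-- ===== LEMMAS AND PROOFS =====

-- one round of A's while loop equals four steps of B's flat loop; recursion on the rest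
theorem pvMain (cs : List Char) (i : Nat) (h4 : cs.length % 4 = 3) (hi : i % 4 = 0)
    (hle : i ≤ cs.length) : pvALoop cs i = pvBLoop (cs.drop i) i := by
  have hlt : i < cs.length := by omega
  have h1 : i + 1 < cs.length := by omega
  have h2 : i + 2 < cs.length := by omega
  have hg0 : pvBGroups[i % 4]! = pvAModifiers := by rw [hi]; decide
  have hg1 : pvBGroups[(i + 1) % 4]! = pvABases := by
    have : (i + 1) % 4 = 1 := by omega
    rw [this]; decide
  have hg2 : pvBGroups[(i + 2) % 4]! = pvASugars := by
    have : (i + 2) % 4 = 2 := by omega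
    rw [this]; decide
  have hg3 : pvBGroups[(i + 3) % 4]! = pvALinkages := by
    have : (i + 3) % 4 = 3 := by omega
    rw [this]; decide
  rw [pvALoop, dif_pos hlt,
      List.drop_eq_getElem_cons hlt, pvBLoop, hg0,
      List.drop_eq_getElem_cons h1, pvBLoop, hg1,
      List.drop_eq_getElem_cons h2, pvBLoop, hg2,
      List.getElem?_eq_getElem h1, List.getElem?_eq_getElem h2]
  by_cases hm : cs[i] ∈ pvAModifiers
  · simp only [if_pos hm]
    by_cases hb : cs[i + 1] ∈ pvABases
    · simp only [if_pos hb]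
      by_cases hs : cs[i + 2] ∈ pvASugars
      · simp only [if_pos hs]
        by_cases hend : i + 3 = cs.length
        · rw [List.getElem?_eq_none (by omega), List.drop_eq_nil_of_le (by omega)]
          rfl
        · have h3 : i + 3 < cs.length := by omega
          have h4' : i + 4 ≤ cs.length := by omega
          rw [List.getElem?_eq_getElem h3, List.drop_eq_getElem_cons h3, pvBLoop, hg3]
          change (if cs[i + 3] ∈ pvALinkages then pvALoop cs (i + 4) else "Failure") = _
          have hrec : pvALoop cs (i + 4) = pvBLoop (cs.drop (i + 3 + 1)) (i + 1 + 1 + 1 + 1) :=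
            pvMain cs (i + 4) h4 (by omega) h4'
          split_ifs with hl hl2 hl3 <;>
            first
              | exact hrec
              | rfl
              | exact absurd hl hl2
              | exact absurd hl2 hl
              | exact absurd hl3 hl
      · simp only [if_neg hs]
    · simp only [if_neg hb]
  · simp only [if_neg hm]
termination_by cs.length - i

-- ===== VERDICT (by name: the statement is the Claim_ definition above) =====
theorem confirmSeq_spec : Claim_equal_confirmSeq := by
  intro seq _
  unfold Spec_confirmSeq confirmSeq confirmSeq_alt
  split_ifs with h
  · rfl
  · exact pvMain seq.toList 0 (by omega) rfl (Nat.zero_le _)
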